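-- pv_equiv track=rewrite | github.com/CarlDalebout/ciss450 | a/a01/a01q08/main.py | f
-- ===== SOURCE A (Python) =====
-- def f(list):
--     ret = []
--     edge = []
--     for i in range(len(list)-1):
--         edge.append(list[i])
--         edge.append(list[i+1])
--         ret.append(edge)
--         edge = []
--     return ret
-- ===== SOURCE B (Python) =====
-- def f(list):
--     # build the result back-to-front: pop pairs off the end, then reverse
--     out = []
--     work = list[:]
--     while len(work) >= 2:
--         b = work.pop()
--         out.append([work[-1], b])
--     out.reverse()
--     return out
-- ===== Notes on version B (the rewrite author's own statement) =====
-- stated objective: alternative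
-- what changed: Replaced A's forward index loop with a scratch 'edge' accumulator by a back-to-front construction: a while loop pops elements off the end of a working copy, emitting pairs in reverse order, and a final reverse restores the order.
import Mathlib
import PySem

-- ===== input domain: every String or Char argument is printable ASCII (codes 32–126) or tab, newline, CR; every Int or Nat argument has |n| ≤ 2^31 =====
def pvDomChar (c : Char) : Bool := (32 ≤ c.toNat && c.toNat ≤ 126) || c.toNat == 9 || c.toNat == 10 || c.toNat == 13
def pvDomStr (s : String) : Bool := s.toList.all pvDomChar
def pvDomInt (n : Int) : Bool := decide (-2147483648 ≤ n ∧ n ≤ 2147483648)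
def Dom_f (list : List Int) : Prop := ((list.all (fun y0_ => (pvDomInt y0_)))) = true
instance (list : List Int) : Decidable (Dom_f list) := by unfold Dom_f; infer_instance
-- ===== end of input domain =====

-- B replaces A's forward index loop (scratch 'edge' accumulator) by a back-to-front
-- construction: pop pairs off the end of a working copy, then reverse (alternative; same cost).
-- B copies 'list' first, so neither version mutates its argument.

-- ===== PORT A =====
-- indices i and i+1 are always in range for i ∈ range(len-1), so pyGetD's default is never used
def f (list : List Int) : List (List Int) :=
  (PySem.List.pyRange 0 ((list.length : Int) - 1) 1).foldl
    (fun ret i =>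
      let edge : List Int := []
      let edge := edge ++ [PySem.List.pyGetD list i 0]
      let edge := edge ++ [PySem.List.pyGetD list (i + 1) 0]
      ret ++ [edge]) []

-- ===== PORT B =====
-- the while loop: b = work.pop(); out.append([work[-1], b]); pop? on a list of length ≥ 2
-- is always some, so the 'none' arm is unreachable
def fLoop (work : List Int) (out : List (List Int)) : List (List Int) :=
  if 2 ≤ work.length then
    match _hp : PySem.List.pop? work with
    | some (b, rest) => fLoop rest (out ++ [[PySem.List.pyGetD rest (-1) 0, b]])
    | none => out
  else out
termination_by work.length
decreasing_by have h := PySem.List.length_of_pop?_eq_some work _hp; simp at h; omega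

def f_alt (list : List Int) : List (List Int) :=
  (fLoop list []).reverse

-- ===== PRECONDITION & SPEC =====
def Spec_f (list : List Int) (out : List (List Int)) : Prop := out = f_alt list
instance (list : List Int) (out : List (List Int)) : Decidable (Spec_f list out) := by unfold Spec_f; infer_instance

-- ===== CLAIM (what is proved, stated in full; the proofs are below) =====
def Claim_equal_f : Prop := ∀ (list : List Int), Dom_f list → Spec_f list (f list)

-- ===== LEMMAS AND PROOFS =====

theorem f_eq_map (list : List Int) :
    f list = (PySem.List.pyRange 0 ((list.length : Int) - 1) 1).map
      (fun i => [PySem.List.pyGetD list i 0, PySem.List.pyGetD list (i + 1) 0]) := by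
  simp only [f, List.nil_append, List.singleton_append]
  exact PySem.List.foldl_append_singleton_eq_map
    (l := PySem.List.pyRange 0 ((list.length : Int) - 1) 1)
    (f := fun i => [PySem.List.pyGetD list i 0, PySem.List.pyGetD list (i + 1) 0]) []

theorem pairs_snoc (ys : List Int) (c : Int) (h : ys ≠ []) :
    List.zipWith (fun a b => ([a, b] : List Int)) (ys ++ [c]) (ys ++ [c]).tail
      = List.zipWith (fun a b => [a, b]) ys ys.tail ++ [[ys.getLast h, c]] := by
  induction ys with
  | nil => exact absurd rfl h
  | cons a t ih =>
    cases t with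
    | nil => simp
    | cons b r =>
      have ht : (b :: r : List Int) ≠ [] := by simp
      have h' := ih ht
      simp only [List.cons_append, List.tail_cons] at h' ⊢
      simp only [List.zipWith_cons_cons, List.cons_append] at h' ⊢
      rw [h']
      simp [List.getLast_cons]

theorem fLoop_eq (work : List Int) :
    ∀ out, fLoop work out
      = out ++ (List.zipWith (fun a b => ([a, b] : List Int)) work work.tail).reverse := by
  induction work using List.reverseRecOn with
  | nil => intro out; rw [fLoop.eq_def]; simp
  | append_singleton ys c ih =>
    intro out
    rw [fLoop.eq_def]
    by_cases h2 : 2 ≤ (ys ++ [c]).length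
    · rw [if_pos h2]
      have hys : ys ≠ [] := by
        intro h; subst h; simp at h2
      split
      · rename_i b rest hp
        rw [PySem.List.pop?_last] at hp
        simp only [Option.some.injEq, Prod.mk.injEq] at hp
        obtain ⟨rfl, rfl⟩ := hp
        rw [ih, pairs_snoc ys c hys,
          PySem.List.pyGetD_neg_one ys 0 hys]
        simp
      · rename_i hp
        rw [PySem.List.pop?_last] at hp
        exact absurd hp (by simp)
    · rw [if_neg h2]
      have : ys = [] := by
        cases ys with
        | nil => rfl
        | cons a t => exfalso; apply h2; simp
      subst this; simp

-- ===== VERDICT (by name: the statement is the Claim_ definition above) =====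
theorem f_spec : Claim_equal_f := by
  intro list _
  show f list = f_alt list
  rw [f_eq_map]
  unfold f_alt
  rw [fLoop_eq, List.nil_append, List.reverse_reverse, PySem.List.pyRange_one]
  apply List.ext_getElem
  · simp only [List.length_map, List.length_range, List.length_zipWith, List.length_tail]
    omega
  · intro k h1 h2
    simp only [List.length_map, List.length_range] at h1
    have hlen : k + 1 < list.length := by omega
    simp only [List.getElem_map, List.getElem_range, List.getElem_zipWith, List.getElem_tail]
    have e1 : PySem.List.pyGetD list (0 + (k : Int)) 0 = list[k] := by
      rw [show ((0 : Int) + (k : Int)) = ((k : Nat) : Int) by ring,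
        PySem.List.pyGetD_natCast, List.getD_eq_getElem?_getD,
        List.getElem?_eq_getElem (by omega : k < list.length)]
      rfl
    have e2 : PySem.List.pyGetD list (0 + (k : Int) + 1) 0 = list[k + 1] := by
      rw [show ((0 : Int) + (k : Int) + 1) = ((k + 1 : Nat) : Int) by push_cast; ring,
        PySem.List.pyGetD_natCast, List.getD_eq_getElem?_getD,
        List.getElem?_eq_getElem hlen]
      rfl
    rw [e1, e2]
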